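-- pv_equiv track=rewrite | github.com/anydevil0812/coding_test | 프로그래머스/lv1/42840. 모의고사/모의고사.py | solution
-- ===== SOURCE A (Python) =====
-- def solution(answers):
--     answer = []
--     a = [1,2,3,4,5] * 2000
--     b = [2,1,2,3,2,4,2,5] * 1250
--     c = [3,3,1,1,2,2,4,4,5,5] * 1000
--     d = []
--     e = []
--     f = []
--     for i in range(len(answers)):
--         if a[i] == answers[i]:
--           d.append("o")
--         if b[i] == answers[i]:
--           e.append("o")
--         if c[i] == answers[i]:
--           f.append("o")
--     g = max(len(d),len(e),len(f))
--     if len(d) == g: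
--         answer.append(1)
--     if len(e) == g:
--         answer.append(2)
--     if len(f) == g:
--         answer.append(3)
--     return answer
-- ===== SOURCE B (Python) =====
-- def solution(answers):
--     # Histogram approach: one pass builds counts keyed by (position mod 40, answer);
--     # since lcm(5,8,10)=40, each supervisor's score is a 40-term table lookup sum.
--     counts = {}
--     for i, ans in enumerate(answers):
--         key = (i % 40, ans)
--         counts[key] = counts.get(key, 0) + 1
--     patterns = [[1, 2, 3, 4, 5], [2, 1, 2, 3, 2, 4, 2, 5], [3, 3, 1, 1, 2, 2, 4, 4, 5, 5]]
--     scores = [sum(counts.get((r, p[r % len(p)]), 0) for r in range(40)) for p in patterns]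
--     best = max(scores)
--     return [k + 1 for k, s in enumerate(scores) if s == best]
-- ===== Notes on version B (the rewrite author's own statement) =====
-- stated objective: alternative
-- what changed: A compares every answer against three pre-materialized 10000-element pattern lists in one interleaved pass, keeping 'o'-sentinel lists whose lengths are the scores; B never compares answers to patterns while scanning: one pass builds a dict histogram keyed by (index mod 40, answer) (40 = lcm of the pattern periods), each supervisor's score is then a 40-term table-lookup sum, and max indices are collected generically.
import Mathlib
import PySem

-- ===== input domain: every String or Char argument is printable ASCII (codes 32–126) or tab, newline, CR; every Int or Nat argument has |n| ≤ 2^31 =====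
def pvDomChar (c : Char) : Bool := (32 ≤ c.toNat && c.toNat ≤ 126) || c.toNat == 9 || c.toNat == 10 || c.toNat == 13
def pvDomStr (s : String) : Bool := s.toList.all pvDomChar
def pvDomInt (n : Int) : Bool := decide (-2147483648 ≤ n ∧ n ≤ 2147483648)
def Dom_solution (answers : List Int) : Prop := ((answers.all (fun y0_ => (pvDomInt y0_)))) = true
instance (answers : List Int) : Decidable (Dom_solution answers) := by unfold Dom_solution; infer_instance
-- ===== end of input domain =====

-- B replaces A's interleaved comparison against three pre-built 10000-element answer
-- lists by a single histogram pass keyed by (index mod 40, answer) and 40-term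
-- table-lookup sums for the three scores (alternative algorithm; same asymptotic cost).


-- ===== PORT A =====
def solution (answers : List Int) : List Int :=
  -- a = [1,2,3,4,5] * 2000 etc. (Python list repetition = concatenation)
  let a := (List.replicate 2000 ([1,2,3,4,5] : List Int)).flatten
  let b := (List.replicate 1250 ([2,1,2,3,2,4,2,5] : List Int)).flatten
  let c := (List.replicate 1000 ([3,3,1,1,2,2,4,4,5,5] : List Int)).flatten
  -- for i in range(len(answers)): three independent appends to d, e, f
  let def_ := (PySem.List.pyRange 0 (answers.length : Int) 1).foldl
    (fun (st : List String × List String × List String) i =>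
      (if PySem.List.pyGet? a i = PySem.List.pyGet? answers i then st.1 ++ ["o"] else st.1,
       if PySem.List.pyGet? b i = PySem.List.pyGet? answers i then st.2.1 ++ ["o"] else st.2.1,
       if PySem.List.pyGet? c i = PySem.List.pyGet? answers i then st.2.2 ++ ["o"] else st.2.2))
    ([], [], [])
  let g := max def_.1.length (max def_.2.1.length def_.2.2.length)
  (if def_.1.length = g then [(1 : Int)] else []) ++
  (if def_.2.1.length = g then [(2 : Int)] else []) ++
  (if def_.2.2.length = g then [(3 : Int)] else [])

-- ===== PORT B =====
def solution_alt (answers : List Int) : List Int :=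
  -- counts[(i % 40, ans)] = counts.get(key, 0) + 1   (single histogram pass)
  let counts := (PySem.List.enumerate answers 0).foldl
    (fun (d : PySem.Dict (Int × Int) Int) p =>
      let key := (PySem.Int.mod p.1 40, p.2)
      d.insert key (d.getD key 0 + 1))
    PySem.Dict.empty
  let patterns : List (List Int) := [[1,2,3,4,5], [2,1,2,3,2,4,2,5], [3,3,1,1,2,2,4,4,5,5]]
  -- sum(counts.get((r, p[r % len(p)]), 0) for r in range(40))
  let scores := patterns.map (fun p =>
    ((PySem.List.pyRange 0 40 1).map (fun r =>
      counts.getD (r, PySem.List.pyGetD p (PySem.Int.mod r (p.length : Int)) 0) 0)).sum)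
  let best := (PySem.List.max? scores (fun s => s)).getD 0   -- scores is nonempty
  (PySem.List.enumerate scores 0).foldl
    (fun acc q => if q.2 = best then acc ++ [q.1 + 1] else acc) []

-- ===== PRECONDITION & SPEC =====
-- Pre_ excludes exactly the inputs where A raises IndexError: with more than 10000
-- answers A's replicated pattern lists run out of elements.
def Pre_solution (answers : List Int) : Prop := answers.length ≤ 10000
instance (answers : List Int) : Decidable (Pre_solution answers) := by unfold Pre_solution; infer_instance
def pvWitness_solution : List Int := [1, 3, 2, 4, 2]
def Spec_solution (answers : List Int) (out : List Int) : Prop := out = solution_alt answers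
instance (answers : List Int) (out : List Int) : Decidable (Spec_solution answers out) := by unfold Spec_solution; infer_instance

-- ===== CLAIM (what is proved, stated in full; the proofs are below) =====
def Claim_equal_solution : Prop := ∀ (answers : List Int), Dom_solution answers → Pre_solution answers → Spec_solution answers (solution answers)

-- ===== LEMMAS AND PROOFS =====

theorem pv_getElem?_flatten_replicate (xs : List Int) (n i : Nat) (h : i < n * xs.length) :
    ((List.replicate n xs).flatten)[i]? = xs[i % xs.length]? := by
  induction n generalizing i with
  | zero => omega
  | succ n ih =>
    rw [List.replicate_succ, List.flatten_cons]
    by_cases hi : i < xs.length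
    · rw [List.getElem?_append_left hi, Nat.mod_eq_of_lt hi]
    · rw [Nat.not_lt] at hi
      rw [List.getElem?_append_right hi, ih (i - xs.length) (by rw [Nat.succ_mul] at h; omega)]
      rw [Nat.mod_eq_sub_mod hi]

-- common counting form: how many answers match the cyclic pattern
def pvCnt (pat answers : List Int) : Nat :=
  List.countP (fun k => decide (answers.getD k 0 = pat.getD (k % pat.length) 0))
    (List.range answers.length)

theorem pvA_len (pat answers : List Int) (N : Nat) (hpat : 0 < pat.length)
    (hn : answers.length ≤ N * pat.length) :
    ((PySem.List.pyRange 0 (answers.length : Int) 1).foldl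
      (fun (d : List String) i =>
        if PySem.List.pyGet? ((List.replicate N pat).flatten) i = PySem.List.pyGet? answers i
        then d ++ ["o"] else d) []).length = pvCnt pat answers := by
  rw [PySem.List.pyRange_zero_natCast, List.foldl_map]
  rw [PySem.List.foldl_congr_mem (List.range answers.length) _
      (fun (d : List String) (k : Nat) =>
        if (fun k => decide (answers.getD k 0 = pat.getD (k % pat.length) 0)) k = true
        then d ++ ["o"] else d) []
      ?_]
  · rw [PySem.List.foldl_append_if
      (fun k => decide (answers.getD k 0 = pat.getD (k % pat.length) 0)) (fun _ => "o")]
    simp [pvCnt, List.countP_eq_length_filter]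
  · intro acc k hk
    rw [List.mem_range] at hk
    have hk2 : k < N * pat.length := lt_of_lt_of_le hk hn
    have hm : k % pat.length < pat.length := Nat.mod_lt _ hpat
    rw [PySem.List.pyGet?_natCast, PySem.List.pyGet?_natCast,
        pv_getElem?_flatten_replicate pat N k hk2,
        List.getElem?_eq_getElem hm, List.getElem?_eq_getElem hk]
    simp [List.getD_eq_getElem?_getD, hm, hk, eq_comm]

-- the histogram key of position k
def pvKey (answers : List Int) (k : Nat) : Int × Int :=
  (((k % 40 : Nat) : Int), answers.getD k 0)

-- the dict built by B's first pass, looked up at any key, is a count over positions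
theorem pvB_counts (answers : List Int) (K : Int × Int) :
    ((PySem.List.enumerate answers 0).foldl
      (fun (d : PySem.Dict (Int × Int) Int) p =>
        d.insert (PySem.Int.mod p.1 40, p.2)
          (d.getD (PySem.Int.mod p.1 40, p.2) 0 + 1))
      PySem.Dict.empty).getD K 0
    = (((List.range answers.length).map (pvKey answers)).count K : Int) := by
  rw [PySem.List.enumerate_eq_map_pyRange answers 0, PySem.List.len_eq,
      PySem.List.pyRange_zero_natCast, List.map_map, List.foldl_map]
  rw [PySem.List.foldl_congr_mem (List.range answers.length) _
      (fun (d : PySem.Dict (Int × Int) Int) (k : Nat) =>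
        d.insert (pvKey answers k) (d.getD (pvKey answers k) 0 + 1)) PySem.Dict.empty
      (by intro acc k hk
          simp [pvKey, PySem.List.pyGetD_natCast])]
  rw [← List.foldl_map (f := pvKey answers)
      (g := fun (d : PySem.Dict (Int × Int) Int) x => d.insert x (d.getD x 0 + 1))]
  rw [PySem.Dict.getD_foldl_insert_add_one]
  simp

-- sum of the partitioned counts over the 40 residue classes collapses to one count
theorem pv_sum_ite_range (m j : Nat) (c : Nat) (hj : j < m) :
    ((List.range m).map (fun r => if r = j then c else 0)).sum = c := by
  induction m with
  | zero => omega
  | succ m ih =>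
    rw [List.range_succ, List.map_append, List.sum_append]
    by_cases h : j = m
    · subst h
      have : ((List.range j).map (fun r => if r = j then c else 0)).sum = 0 := by
        apply List.sum_eq_zero
        intro x hx
        simp only [List.mem_map, List.mem_range] at hx
        obtain ⟨r, hr, rfl⟩ := hx
        simp [Nat.ne_of_lt hr]
      simp [this]
    · have := ih (by omega)
      simp only [List.map_cons, List.map_nil, List.sum_cons, List.sum_nil]
      rw [this]
      simp [Ne.symm h]

theorem pv_partition (L : List Nat) (lp : Nat) (hd : lp ∣ 40) (exp : Nat → Int)
    (g : Nat → Int) :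
    ((List.range 40).map (fun r =>
      L.countP (fun k => decide (k % 40 = r ∧ g k = exp (r % lp))))).sum
    = L.countP (fun k => decide (g k = exp (k % lp))) := by
  induction L with
  | nil => simp
  | cons k L ih =>
    simp only [List.countP_cons]
    have hsplit :
        ((List.range 40).map (fun r =>
          L.countP (fun k => decide (k % 40 = r ∧ g k = exp (r % lp)))
          + if (decide (k % 40 = r ∧ g k = exp (r % lp))) = true then 1 else 0)).sum
        = ((List.range 40).map (fun r =>
            L.countP (fun k => decide (k % 40 = r ∧ g k = exp (r % lp))))).sum
          + ((List.range 40).map (fun r =>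
              if (decide (k % 40 = r ∧ g k = exp (r % lp))) = true then 1 else 0)).sum := by
      induction (List.range 40) with
      | nil => simp
      | cons r t iht => simp only [List.map_cons, List.sum_cons, iht]; omega
    rw [hsplit, ih]
    have hmod : k % 40 % lp = k % lp := Nat.mod_mod_of_dvd k hd
    have hterm : ((List.range 40).map (fun r =>
        if (decide (k % 40 = r ∧ g k = exp (r % lp))) = true then 1 else 0)).sum
        = if (decide (g k = exp (k % lp))) = true then 1 else 0 := by
      have heq : ∀ r, (if (decide (k % 40 = r ∧ g k = exp (r % lp))) = true then 1 else 0)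
          = (if r = k % 40 then (if (decide (g k = exp (k % lp))) = true then 1 else 0) else 0) := by
        intro r
        by_cases hr : r = k % 40
        · subst hr; simp [hmod]
        · have hr' : ¬ (k % 40 = r) := fun h => hr h.symm
          simp [hr', hr]
      simp only [heq]
      exact pv_sum_ite_range 40 (k % 40) _ (Nat.mod_lt _ (by omega))
    omega

-- B's score for one pattern equals the direct cyclic-match count
theorem pvB_score (pat answers : List Int) (hd : pat.length ∣ 40) :
    ((PySem.List.pyRange 0 40 1).map (fun r =>
      (((PySem.List.enumerate answers 0).foldl
        (fun (d : PySem.Dict (Int × Int) Int) p =>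
          d.insert (PySem.Int.mod p.1 40, p.2)
            (d.getD (PySem.Int.mod p.1 40, p.2) 0 + 1))
        PySem.Dict.empty).getD
          (r, PySem.List.pyGetD pat (PySem.Int.mod r (pat.length : Int)) 0) 0))).sum
    = (pvCnt pat answers : Int) := by
  have h40 : PySem.List.pyRange 0 40 1
      = List.map (fun n : Nat => (n : Int)) (List.range 40) := by
    rw [show (40 : Int) = ((40 : Nat) : Int) by norm_num, PySem.List.pyRange_zero_natCast]
  rw [h40, List.map_map]
  have hmap : ∀ r ∈ List.range 40,
      (((fun r => (((PySem.List.enumerate answers 0).foldl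
        (fun (d : PySem.Dict (Int × Int) Int) p =>
          d.insert (PySem.Int.mod p.1 40, p.2)
            (d.getD (PySem.Int.mod p.1 40, p.2) 0 + 1))
        PySem.Dict.empty).getD
          (r, PySem.List.pyGetD pat (PySem.Int.mod r (pat.length : Int)) 0) 0)) ∘ (fun n : Nat => (n : Int))) r)
      = (((List.range answers.length).countP
          (fun k => decide (k % 40 = r ∧ answers.getD k 0 = pat.getD (r % pat.length) 0)) : Nat) : Int) := by
    intro r _
    simp only [Function.comp_apply, PySem.Int.mod_natCast, PySem.List.pyGetD_natCast]
    rw [pvB_counts answers (((r : Nat) : Int), pat.getD (r % pat.length) 0)]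
    congr 1
    rw [List.count_eq_countP, List.countP_map]
    apply List.countP_congr
    intro k _
    simp [pvKey, Prod.ext_iff]
    intro _
    omega
  rw [List.map_congr_left hmap]
  unfold pvCnt
  rw [← pv_partition (List.range answers.length) pat.length hd
      (fun m => pat.getD m 0) (fun k => answers.getD k 0)]
  rw [Nat.cast_list_sum, List.map_map]
  rfl

theorem solution_spec : Claim_equal_solution := by
  intro answers _ hpre
  unfold Pre_solution at hpre
  unfold Spec_solution solution solution_alt
  simp only []
  rw [PySem.List.foldl_prod_mk
      (f := fun (d : List String) i =>
        if PySem.List.pyGet? ((List.replicate 2000 ([1,2,3,4,5] : List Int)).flatten) i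
            = PySem.List.pyGet? answers i then d ++ ["o"] else d)
      (g := fun (st : List String × List String) i =>
        (if PySem.List.pyGet? ((List.replicate 1250 ([2,1,2,3,2,4,2,5] : List Int)).flatten) i
            = PySem.List.pyGet? answers i then st.1 ++ ["o"] else st.1,
         if PySem.List.pyGet? ((List.replicate 1000 ([3,3,1,1,2,2,4,4,5,5] : List Int)).flatten) i
            = PySem.List.pyGet? answers i then st.2 ++ ["o"] else st.2))]
  rw [PySem.List.foldl_prod_mk
      (f := fun (d : List String) i =>
        if PySem.List.pyGet? ((List.replicate 1250 ([2,1,2,3,2,4,2,5] : List Int)).flatten) i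
            = PySem.List.pyGet? answers i then d ++ ["o"] else d)
      (g := fun (d : List String) i =>
        if PySem.List.pyGet? ((List.replicate 1000 ([3,3,1,1,2,2,4,4,5,5] : List Int)).flatten) i
            = PySem.List.pyGet? answers i then d ++ ["o"] else d)]
  simp only [List.map_cons, List.map_nil]
  rw [pvA_len [1,2,3,4,5] answers 2000 (by decide) (by simp; omega),
      pvA_len [2,1,2,3,2,4,2,5] answers 1250 (by decide) (by simp; omega),
      pvA_len [3,3,1,1,2,2,4,4,5,5] answers 1000 (by decide) (by simp; omega)]
  simp only [pvB_score [1,2,3,4,5] answers (by decide),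
      pvB_score [2,1,2,3,2,4,2,5] answers (by decide),
      pvB_score [3,3,1,1,2,2,4,4,5,5] answers (by decide)]
  simp only [PySem.List.max?_id_cons, Option.getD_some,
    PySem.List.enumerate_cons, PySem.List.enumerate_nil, List.foldl_cons,
    List.foldl, ← Nat.cast_max, Nat.cast_inj, max_assoc]
  split_ifs <;> simp
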